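-- pv_equiv track=rewrite | github.com/Remag29/AdventOfCode | 2020/06/part2.py | count_everyone_answer
-- ===== SOURCE A (Python) =====
-- def count_everyone_answer(group):
--     everyone_answer = set()
--     # get letter common to all answers
--     for answer in group[0]:
--         is_common = True
--         for person in group:
--             if answer not in person:
--                 is_common = False
--                 break
--         if is_common:
--             everyone_answer.add(answer)
--     return len(everyone_answer)
-- ===== SOURCE B (Python) =====
-- def count_everyone_answer(group):
--     common = set(group[0])
--     for person in group[1:]:
--         common &= set(person)
--     return len(common)
-- ===== Notes on version B (the rewrite author's own statement) =====
-- stated objective: simpler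
-- what changed: Replaces A's per-letter scan of group[0] with a nested membership loop over all persons by a single fold over group[1:] maintaining a narrowing set intersection.
import Mathlib
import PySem

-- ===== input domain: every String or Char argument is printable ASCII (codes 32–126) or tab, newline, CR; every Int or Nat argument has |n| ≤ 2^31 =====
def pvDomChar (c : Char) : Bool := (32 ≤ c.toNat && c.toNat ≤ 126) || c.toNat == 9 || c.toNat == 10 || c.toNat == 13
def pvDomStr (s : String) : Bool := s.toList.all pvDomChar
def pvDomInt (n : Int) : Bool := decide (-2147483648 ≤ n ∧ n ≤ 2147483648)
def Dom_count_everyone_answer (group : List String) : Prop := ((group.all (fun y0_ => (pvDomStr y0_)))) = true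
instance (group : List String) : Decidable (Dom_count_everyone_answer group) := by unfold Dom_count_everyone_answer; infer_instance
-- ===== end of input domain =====

-- B replaces A's per-letter nested membership scan by a single fold of set intersections over group[1:] (objective: simpler).

-- ===== PORT A =====
-- inner 'for person in group: if answer not in person: is_common = False; break' loop
def ceaIsCommon (answer : Char) : List String → Bool
  | [] => true
  | person :: rest =>
    if !(person.toList.contains answer) then false   -- break with is_common = False
    else ceaIsCommon answer rest

def count_everyone_answer (group : List String) : Int :=
  match PySem.List.pyGet? group 0 with
  | none => 0   -- IndexError in Python; excluded by Pre_
  | some g0 =>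
    let everyone := g0.toList.foldl
      (fun s answer => if ceaIsCommon answer group then PySem.Set.add s answer else s)
      (PySem.Set.empty : PySem.Set Char)
    (everyone.length : Int)

-- ===== PORT B =====
def count_everyone_answer_alt (group : List String) : Int :=
  match PySem.List.pyGet? group 0 with
  | none => 0   -- IndexError in Python; excluded by Pre_
  | some g0 =>
    let common := (group.drop 1).foldl
      (fun s person => PySem.Set.inter s (PySem.Set.ofList person.toList))
      (PySem.Set.ofList g0.toList)
    (common.length : Int)

-- ===== PRECONDITION & SPEC =====
-- A (and B) raise IndexError on the empty group via group[0]
def Pre_count_everyone_answer (group : List String) : Prop := group ≠ []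
instance (group : List String) : Decidable (Pre_count_everyone_answer group) := by unfold Pre_count_everyone_answer; infer_instance
def pvWitness_count_everyone_answer : List String := ["ab", "abc"]

def Spec_count_everyone_answer (group : List String) (out : Int) : Prop := out = count_everyone_answer_alt group
instance (group : List String) (out : Int) : Decidable (Spec_count_everyone_answer group out) := by unfold Spec_count_everyone_answer; infer_instance

-- ===== CLAIM (what is proved, stated in full; the proofs are below) =====
def Claim_equal_count_everyone_answer : Prop := ∀ (group : List String), Dom_count_everyone_answer group → Pre_count_everyone_answer group → Spec_count_everyone_answer group (count_everyone_answer group)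

-- ===== LEMMAS AND PROOFS =====

theorem ceaIsCommon_iff (answer : Char) (l : List String) :
    ceaIsCommon answer l = true ↔ ∀ p ∈ l, answer ∈ p.toList := by
  induction l with
  | nil => simp [ceaIsCommon]
  | cons p rest ih =>
    simp only [ceaIsCommon]
    by_cases h : answer ∈ p.toList <;> simp [h, ih]

theorem memA_fold (group : List String) (l : List Char) (s : PySem.Set Char)
    (y : Char) :
    y ∈ l.foldl (fun s a => if ceaIsCommon a group then PySem.Set.add s a else s) s ↔
      y ∈ s ∨ (y ∈ l ∧ ceaIsCommon y group = true) := by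
  induction l generalizing s with
  | nil => simp
  | cons c cs ih =>
    simp only [List.foldl_cons, ih]
    by_cases hc : ceaIsCommon c group = true
    · simp only [hc, if_pos]
      rw [PySem.Set.mem_add]
      constructor
      · rintro (⟨h | rfl⟩ | h)
        · exact Or.inl h
        · exact Or.inr ⟨List.mem_cons_self .., hc⟩
        · exact Or.inr ⟨List.mem_cons_of_mem _ h.1, h.2⟩
      · rintro (h | ⟨hm, hy⟩)
        · exact Or.inl (Or.inl h)
        · rcases List.mem_cons.mp hm with rfl | hm
          · exact Or.inl (Or.inr rfl)
          · exact Or.inr ⟨hm, hy⟩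
    · simp only [hc, if_neg, Bool.false_eq_true, not_false_eq_true]
      constructor
      · rintro (h | h)
        · exact Or.inl h
        · exact Or.inr ⟨List.mem_cons_of_mem _ h.1, h.2⟩
      · rintro (h | ⟨hm, hy⟩)
        · exact Or.inl h
        · rcases List.mem_cons.mp hm with rfl | hm
          · exact absurd hy hc
          · exact Or.inr ⟨hm, hy⟩

theorem nodupA_fold (group : List String) (l : List Char) (s : PySem.Set Char)
    (hs : s.Nodup) :
    (l.foldl (fun s a => if ceaIsCommon a group then PySem.Set.add s a else s) s).Nodup := by
  induction l generalizing s with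
  | nil => exact hs
  | cons c cs ih =>
    simp only [List.foldl_cons]
    split
    · exact ih _ (PySem.Set.nodup_add _ _ hs)
    · exact ih _ hs

theorem memB_fold (rest : List String) (s : PySem.Set Char) (y : Char) :
    y ∈ rest.foldl (fun s p => PySem.Set.inter s (PySem.Set.ofList p.toList)) s ↔
      y ∈ s ∧ ∀ p ∈ rest, y ∈ p.toList := by
  induction rest generalizing s with
  | nil => simp
  | cons p ps ih =>
    simp only [List.foldl_cons, ih, PySem.Set.mem_inter, PySem.Set.mem_ofList,
      List.mem_cons]
    constructor
    · rintro ⟨⟨h1, h2⟩, h3⟩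
      exact ⟨h1, fun q hq => by rcases hq with rfl | hq; exact h2; exact h3 q hq⟩
    · rintro ⟨h1, h2⟩
      exact ⟨⟨h1, h2 p (Or.inl rfl)⟩, fun q hq => h2 q (Or.inr hq)⟩

theorem nodupB_fold (rest : List String) (s : PySem.Set Char) (hs : s.Nodup) :
    (rest.foldl (fun s p => PySem.Set.inter s (PySem.Set.ofList p.toList)) s).Nodup := by
  induction rest generalizing s with
  | nil => exact hs
  | cons p ps ih => exact ih _ (PySem.Set.nodup_inter _ _ hs)

-- ===== VERDICT (by name: the statement is the Claim_ definition above) =====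
theorem count_everyone_answer_spec : Claim_equal_count_everyone_answer := by
  intro group _ hpre
  obtain ⟨g0, rest, rfl⟩ : ∃ g0 rest, group = g0 :: rest := by
    cases group with
    | nil => exact absurd rfl hpre
    | cons a l => exact ⟨a, l, rfl⟩
  unfold Spec_count_everyone_answer count_everyone_answer count_everyone_answer_alt
  have hget : PySem.List.pyGet? (g0 :: rest) 0 = some g0 := by
    simp [PySem.List.pyGet?, PySem.List.pyIdx?]
  rw [hget]
  simp only [List.drop_succ_cons, List.drop_zero]
  have hperm :
      (rest.foldl (fun s p => PySem.Set.inter s (PySem.Set.ofList p.toList))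
          (PySem.Set.ofList g0.toList)).Perm
        (g0.toList.foldl
          (fun s a => if ceaIsCommon a (g0 :: rest) then PySem.Set.add s a else s)
          (PySem.Set.empty : PySem.Set Char)) := by
    refine (List.perm_ext_iff_of_nodup
        (nodupB_fold _ _ (PySem.Set.nodup_ofList _))
        (nodupA_fold _ _ _ List.nodup_nil)).mpr fun y => ?_
    rw [memB_fold, memA_fold, ceaIsCommon_iff, PySem.Set.mem_ofList]
    constructor
    · rintro ⟨h0, hrest⟩
      exact Or.inr ⟨h0, fun p hp => by
        rcases List.mem_cons.mp hp with rfl | hp; exact h0; exact hrest p hp⟩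
    · rintro (h | ⟨h0, hall⟩)
      · exact absurd h (List.not_mem_nil)
      · exact ⟨h0, fun p hp => hall p (List.mem_cons_of_mem _ hp)⟩
  exact_mod_cast hperm.length_eq.symm
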